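-- pv_equiv track=rewrite | github.com/Blizzardnya/yandex-algorithms | Homework_B2/B.py | measure_distance
-- ===== SOURCE A (Python) =====
-- def measure_distance(buildings):
--     result = []
--     for index, building in enumerate(buildings):
--         if building != 1:
--             result.append(0)
--         else:
--             right_list = buildings[index + 1:]
--             try:
--                 result.append(right_list.index(2) + 1)
--             except ValueError:
--                 result.append(-1)
--
--     return result
-- ===== SOURCE B (Python) =====
-- def measure_distance(buildings):
--     # single right-to-left pass: d = distance to nearest 2 strictly to the right (-1 if none)
--     res = []
--     d = -1
--     for b in reversed(buildings):
--         res.append(d if b == 1 else 0)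
--         if b == 2:
--             d = 1
--         elif d != -1:
--             d += 1
--     res.reverse()
--     return res
-- ===== Notes on version B (the rewrite author's own statement) =====
-- stated objective: alternative
-- what changed: Replaced the per-1 scan of the whole right suffix (slice + list.index) by a single right-to-left pass that maintains the distance to the nearest 2 seen so far.
import Mathlib
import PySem

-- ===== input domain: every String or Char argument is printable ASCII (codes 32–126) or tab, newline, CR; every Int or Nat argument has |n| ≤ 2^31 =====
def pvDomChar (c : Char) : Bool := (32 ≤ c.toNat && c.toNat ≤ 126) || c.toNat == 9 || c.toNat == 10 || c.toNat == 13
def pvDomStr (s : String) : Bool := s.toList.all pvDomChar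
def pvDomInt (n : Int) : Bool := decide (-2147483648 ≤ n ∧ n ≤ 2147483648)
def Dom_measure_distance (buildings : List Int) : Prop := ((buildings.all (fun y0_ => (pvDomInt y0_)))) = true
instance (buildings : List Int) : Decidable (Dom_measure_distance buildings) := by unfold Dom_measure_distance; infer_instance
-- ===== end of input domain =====

-- B replaces A's per-1 scan of the right suffix (slice + list.index) by one right-to-left pass tracking the distance to the last seen 2.

-- ===== PORT A =====
def measure_distance (buildings : List Int) : List Int :=
  (PySem.List.enumerate buildings 0).foldl
    (fun result p =>
      if p.2 ≠ (1 : Int) then result ++ [(0 : Int)]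
      else
        let right_list := PySem.List.slice buildings (some (p.1 + 1)) none
        match PySem.List.index? right_list 2 with
        | some k => result ++ [(k : Int) + 1]
        | none => result ++ [(-1 : Int)]) []

-- ===== PORT B =====
def measure_distance_alt (buildings : List Int) : List Int :=
  (buildings.foldr
    (fun b st =>
      ((if b == 2 then (1 : Int) else if st.1 != -1 then st.1 + 1 else -1),
       (if b == 1 then st.1 else 0) :: st.2))
    ((-1 : Int), ([] : List Int))).2

-- ===== PRECONDITION & SPEC =====
def Spec_measure_distance (buildings : List Int) (out : List Int) : Prop := out = measure_distance_alt buildings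
instance (buildings : List Int) (out : List Int) : Decidable (Spec_measure_distance buildings out) := by unfold Spec_measure_distance; infer_instance

-- ===== CLAIM (what is proved, stated in full; the proofs are below) =====
def Claim_equal_measure_distance : Prop := ∀ (buildings : List Int), Dom_measure_distance buildings → Spec_measure_distance buildings (measure_distance buildings)

-- ===== LEMMAS AND PROOFS =====

/-- distance to the first `2` of a list (1-based), -1 if none. -/
def pvIdx2 (t : List Int) : Int :=
  match PySem.List.index? t 2 with
  | some k => (k : Int) + 1
  | none => -1

/-- reference answer, structural recursion. -/
def pvF : List Int → List Int
  | [] => []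
  | b :: t => (if b = 1 then pvIdx2 t else 0) :: pvF t

/-- per-element value of A's loop at index `p.1`. -/
def pvG (buildings : List Int) (p : Int × Int) : Int :=
  if p.2 = 1 then pvIdx2 (PySem.List.slice buildings (some (p.1 + 1)) none) else 0

lemma pvIdx2_cons (b : Int) (t : List Int) :
    pvIdx2 (b :: t) = if b = 2 then 1 else if pvIdx2 t ≠ -1 then pvIdx2 t + 1 else -1 := by
  unfold pvIdx2
  by_cases hb : b = 2
  · subst hb
    rw [PySem.List.index?_cons_self]
    simp
  · rw [PySem.List.index?_cons_of_ne t hb]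
    cases h : PySem.List.index? t 2 with
    | none => simp [hb]
    | some k =>
      simp only [Option.map_some, hb, if_false]
      split_ifs with hne
      · push_cast; ring
      · exfalso; omega

lemma alt_foldr (l : List Int) :
    (l.foldr
      (fun b st =>
        ((if b == 2 then (1 : Int) else if st.1 != -1 then st.1 + 1 else -1),
         (if b == 1 then st.1 else 0) :: st.2))
      ((-1 : Int), ([] : List Int))) = (pvIdx2 l, pvF l) := by
  induction l with
  | nil => simp [pvIdx2, pvF, PySem.List.index?_eq_idxOf?]
  | cons b t ih =>
    simp only [List.foldr_cons, ih, pvF]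
    rw [pvIdx2_cons]
    by_cases hb : b = 2 <;> by_cases h1 : b = 1 <;>
      by_cases hd : pvIdx2 t = -1 <;> simp_all

lemma alt_eq_pvF (l : List Int) : measure_distance_alt l = pvF l := by
  unfold measure_distance_alt
  rw [alt_foldr]

lemma a_foldl (buildings : List Int) (l : List (Int × Int)) :
    ∀ (acc : List Int),
    l.foldl
      (fun result p =>
        if p.2 ≠ (1 : Int) then result ++ [(0 : Int)]
        else
          let right_list := PySem.List.slice buildings (some (p.1 + 1)) none
          match PySem.List.index? right_list 2 with
          | some k => result ++ [(k : Int) + 1]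
          | none => result ++ [(-1 : Int)]) acc
    = acc ++ l.map (pvG buildings) := by
  induction l with
  | nil => intro acc; simp
  | cons x t ih =>
    intro acc
    simp only [List.foldl_cons, List.map_cons]
    rw [ih]
    have hstep :
        (if x.2 ≠ (1 : Int) then acc ++ [(0 : Int)]
         else
           let right_list := PySem.List.slice buildings (some (x.1 + 1)) none
           match PySem.List.index? right_list 2 with
           | some k => acc ++ [(k : Int) + 1]
           | none => acc ++ [(-1 : Int)]) = acc ++ [pvG buildings x] := by
      unfold pvG
      by_cases h : x.2 = 1
      · simp only [h, ne_eq, not_true_eq_false, if_false, pvIdx2]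
        cases hi : PySem.List.index? (PySem.List.slice buildings (some (x.1 + 1)) none) 2 <;>
          simp
      · simp [h]
    rw [hstep, List.append_assoc]
    rfl

lemma map_enumerate_eq_pvF (buildings : List Int) :
    ∀ (t : List Int) (s : ℕ), buildings.drop s = t →
      (PySem.List.enumerate t (s : Int)).map (pvG buildings) = pvF t := by
  intro t
  induction t with
  | nil => intro s _; simp [PySem.List.enumerate_nil, pvF]
  | cons b t' ih =>
    intro s hdrop
    have h' : buildings.drop (s + 1) = t' := by
      have h1 : buildings.drop (s + 1) = (buildings.drop s).drop 1 := by
        rw [List.drop_drop, Nat.add_comm]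
      rw [h1, hdrop]; rfl
    have hc : ((s : Int) + 1) = ((s + 1 : ℕ) : Int) := by push_cast; ring
    rw [PySem.List.enumerate_cons, List.map_cons, pvF, hc]
    refine congrArg₂ List.cons ?_ (ih (s + 1) h')
    unfold pvG
    simp only [hc, PySem.List.slice_from_natCast, h']

-- ===== VERDICT (by name: the statement is the Claim_ definition above) =====
theorem measure_distance_spec : Claim_equal_measure_distance := by
  intro buildings _
  unfold Spec_measure_distance
  rw [alt_eq_pvF]
  unfold measure_distance
  rw [a_foldl]
  have := map_enumerate_eq_pvF buildings buildings 0 (by simp)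
  simpa using this
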